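-- pv_equiv track=rewrite | github.com/nicoaira/rna_alignment_generator_py | real_time_alignment.py | _render_alignment
-- ===== SOURCE A (Python) =====
-- from typing import Any, Dict, List, Optional, Tuple
--
-- def _render_alignment(
--     order: List[int],
--     parent_map: Dict[int, str],
--     child_map: Dict[int, str],
--     highlight_cols: set[int],
--     line_width: int,
-- ) -> List[str]:
--     lines: List[str] = []
--     for start in range(0, len(order), line_width):
--         segment_cols = order[start:start + line_width]
--         parent_line = ''.join(parent_map.get(col, '-') for col in segment_cols)
--         child_line = ''.join(child_map.get(col, '-') for col in segment_cols)
--         marker_line = ''.join('^' if col in highlight_cols else ' ' for col in segment_cols)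
--         lines.extend([parent_line, child_line, marker_line, ""])
--     if lines and lines[-1] == "":
--         lines.pop()
--     return lines
-- ===== SOURCE B (Python) =====
-- from typing import Any, Dict, List, Optional, Tuple
--
-- def _render_alignment(
--     order: List[int],
--     parent_map: Dict[int, str],
--     child_map: Dict[int, str],
--     highlight_cols: "set[int]",
--     line_width: int,
-- ) -> List[str]:
--     # Single streaming pass: walk the columns once, accumulating the three rows
--     # of the current block in buffers; flush a block (with a blank separator
--     # before every block after the first) whenever the buffer reaches
--     # line_width, and flush the partial buffer at the end. No range(), no
--     # slicing, no trailing-"" pop. Nonpositive widths yield no blocks.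
--     if line_width <= 0:
--         return []
--     lines: List[str] = []
--     p: List[str] = []
--     c: List[str] = []
--     m: List[str] = []
--
--     def flush() -> None:
--         if lines:
--             lines.append("")
--         lines.append(''.join(p))
--         lines.append(''.join(c))
--         lines.append(''.join(m))
--         p.clear(); c.clear(); m.clear()
--
--     for col in order:
--         p.append(parent_map.get(col, '-'))
--         c.append(child_map.get(col, '-'))
--         m.append('^' if col in highlight_cols else ' ')
--         if len(p) == line_width:
--             flush()
--     if p:
--         flush()
--     return lines
-- ===== Notes on version B (the rewrite author's own statement) =====
-- stated objective: alternative
-- what changed: B replaces A's chunk-then-format scheme (range/slice each width-chunk, append a '' after every block, pop the trailing '') by a single streaming pass over the columns with three row buffers that are flushed into output blocks whenever they fill, with the blank separator emitted before each later block.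
import Mathlib
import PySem

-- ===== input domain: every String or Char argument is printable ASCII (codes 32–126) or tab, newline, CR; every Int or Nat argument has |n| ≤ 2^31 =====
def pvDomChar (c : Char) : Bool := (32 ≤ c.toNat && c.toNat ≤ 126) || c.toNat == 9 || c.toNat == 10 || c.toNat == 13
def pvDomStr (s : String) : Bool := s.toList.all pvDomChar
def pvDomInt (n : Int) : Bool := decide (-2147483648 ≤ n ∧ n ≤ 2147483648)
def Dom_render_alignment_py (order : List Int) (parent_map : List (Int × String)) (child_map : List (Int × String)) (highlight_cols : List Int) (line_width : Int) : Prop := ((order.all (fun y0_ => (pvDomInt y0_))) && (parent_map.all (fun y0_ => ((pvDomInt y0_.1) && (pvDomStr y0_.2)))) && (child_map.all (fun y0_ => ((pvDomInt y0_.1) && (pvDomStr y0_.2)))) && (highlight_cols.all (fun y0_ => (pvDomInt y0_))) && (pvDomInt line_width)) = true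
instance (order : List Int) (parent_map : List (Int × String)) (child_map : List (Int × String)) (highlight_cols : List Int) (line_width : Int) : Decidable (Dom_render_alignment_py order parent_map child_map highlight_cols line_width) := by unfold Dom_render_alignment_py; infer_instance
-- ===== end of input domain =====

-- B streams the columns once through three row buffers flushed at width (separator emitted
-- before each later block), instead of A's range/slice chunking with a trailing-"" pop;
-- same cost, a genuinely different single-pass decomposition.


-- ===== PORT A =====
def render_alignment_py (order : List Int) (parent_map : List (Int × String)) (child_map : List (Int × String)) (highlight_cols : List Int) (line_width : Int) : List String :=
  let lines : List String :=
    (PySem.List.pyRange 0 (order.length : Int) line_width).foldl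
      (fun lines start =>
        let segment_cols := PySem.List.slice order (some start) (some (start + line_width))
        let parent_line := PySem.Str.join "" (segment_cols.map (fun col => PySem.Dict.getD ⟨parent_map⟩ col "-"))
        let child_line := PySem.Str.join "" (segment_cols.map (fun col => PySem.Dict.getD ⟨child_map⟩ col "-"))
        let marker_line := PySem.Str.join "" (segment_cols.map (fun col => if PySem.Set.contains highlight_cols col then "^" else " "))
        lines ++ [parent_line, child_line, marker_line, ""]) []
  if lines.getLast? = some "" then lines.dropLast else lines

-- ===== PORT B =====
-- streaming state: (output lines, parent buffer, child buffer, marker buffer)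
def render_alignment_py_alt (order : List Int) (parent_map : List (Int × String)) (child_map : List (Int × String)) (highlight_cols : List Int) (line_width : Int) : List String :=
  if line_width ≤ 0 then []
  else
    let st := order.foldl
      (fun (st : List String × List String × List String × List String) col =>
        let lines := st.1
        let p := st.2.1 ++ [PySem.Dict.getD ⟨parent_map⟩ col "-"]
        let c := st.2.2.1 ++ [PySem.Dict.getD ⟨child_map⟩ col "-"]
        let m := st.2.2.2 ++ [if PySem.Set.contains highlight_cols col then "^" else " "]
        if (p.length : Int) = line_width then
          ((if lines = [] then lines else lines ++ [""]) ++
            [PySem.Str.join "" p, PySem.Str.join "" c, PySem.Str.join "" m], [], [], [])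
        else (lines, p, c, m))
      ([], [], [], [])
    if st.2.1 ≠ [] then
      (if st.1 = [] then st.1 else st.1 ++ [""]) ++
        [PySem.Str.join "" st.2.1, PySem.Str.join "" st.2.2.1, PySem.Str.join "" st.2.2.2]
    else st.1

-- ===== PRECONDITION & SPEC =====
-- Pre_ excludes only line_width = 0, where Python's range(0, n, 0) raises ValueError in A.
def Pre_render_alignment_py (order : List Int) (parent_map : List (Int × String)) (child_map : List (Int × String)) (highlight_cols : List Int) (line_width : Int) : Prop := line_width ≠ 0
instance (order : List Int) (parent_map : List (Int × String)) (child_map : List (Int × String)) (highlight_cols : List Int) (line_width : Int) : Decidable (Pre_render_alignment_py order parent_map child_map highlight_cols line_width) := by unfold Pre_render_alignment_py; infer_instance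
def pvWitness_render_alignment_py : List Int × (List (Int × String)) × (List (Int × String)) × List Int × Int := ([1, 2, 3], [(1, "A"), (2, "C")], [(2, "G")], [2], 2)
def Spec_render_alignment_py (order : List Int) (parent_map : List (Int × String)) (child_map : List (Int × String)) (highlight_cols : List Int) (line_width : Int) (out : List String) : Prop := out = render_alignment_py_alt order parent_map child_map highlight_cols line_width
instance (order : List Int) (parent_map : List (Int × String)) (child_map : List (Int × String)) (highlight_cols : List Int) (line_width : Int) (out : List String) : Decidable (Spec_render_alignment_py order parent_map child_map highlight_cols line_width out) := by unfold Spec_render_alignment_py; infer_instance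

-- ===== CLAIM =====
def Claim_equal_render_alignment_py : Prop := ∀ (order : List Int) (parent_map : List (Int × String)) (child_map : List (Int × String)) (highlight_cols : List Int) (line_width : Int), Dom_render_alignment_py order parent_map child_map highlight_cols line_width → Pre_render_alignment_py order parent_map child_map highlight_cols line_width → Spec_render_alignment_py order parent_map child_map highlight_cols line_width (render_alignment_py order parent_map child_map highlight_cols line_width)

-- ===== LEMMAS AND PROOFS =====

-- the shared block vocabulary: a rendered block for one chunk of columns, and the
-- separator-before fold over a list of chunks
def pvSep (lines : List String) : List String := if lines = [] then lines else lines ++ [""]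

def pvBlock (P C M : Int → String) (seg : List Int) : List String :=
  [PySem.Str.join "" (seg.map P), PySem.Str.join "" (seg.map C), PySem.Str.join "" (seg.map M)]

def pvChunkFold (P C M : Int → String) (lines : List String) (chs : List (List Int)) : List String :=
  chs.foldl (fun a seg => pvSep a ++ pvBlock P C M seg) lines

-- the chunk list of width v+1 (the +1 makes the recursion obviously terminating)
def pvChunks (v : Nat) : List Int → List (List Int)
  | [] => []
  | x :: xs => (x :: xs).take (v + 1) :: pvChunks v ((x :: xs).drop (v + 1))
termination_by xs => xs.length
decreasing_by simp

theorem pvChunks_cons (v : Nat) (x : Int) (xs : List Int) :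
    pvChunks v (x :: xs) = (x :: xs).take (v + 1) :: pvChunks v ((x :: xs).drop (v + 1)) := by
  rw [pvChunks]

-- A's fold (append block then "") vs the separator-before fold, related by a trailing ""
theorem fold_sep (P C M : Int → String) :
    ∀ (R : List Int) (acc : List String), acc ≠ [] →
      R.foldl (fun a s => a ++ [P s, C s, M s, ""]) (acc ++ [""]) =
      (R.foldl (fun a s => pvSep a ++ [P s, C s, M s]) acc) ++ [""] := by
  intro R
  induction R with
  | nil => intro acc _; rfl
  | cons s R ih =>
      intro acc hacc
      simp only [List.foldl_cons, pvSep, if_neg hacc]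
      rw [show (acc ++ [""]) ++ [P s, C s, M s, ""]
            = (acc ++ [""] ++ [P s, C s, M s]) ++ [""] by simp]
      exact ih (acc ++ [""] ++ [P s, C s, M s]) (by simp)

-- the whole shape of A (fold then pop trailing "") equals the separator-before fold
theorem main_shape (P C M : Int → String) (R : List Int) :
    (let lines := R.foldl (fun a s => a ++ [P s, C s, M s, ""]) ([] : List String);
     if lines.getLast? = some "" then lines.dropLast else lines) =
    R.foldl (fun a s => pvSep a ++ [P s, C s, M s]) [] := by
  cases R with
  | nil => rfl
  | cons s R' =>
      simp only [List.foldl_cons, List.nil_append]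
      rw [show ([P s, C s, M s, ""] : List String) = [P s, C s, M s] ++ [""] by simp]
      rw [fold_sep P C M R' [P s, C s, M s] (by simp)]
      simp [pvSep]

-- the number of range steps for a positive width wn over n columns, split off one chunk
theorem count_split (wn n : Nat) (hw : 0 < wn) (hn : 0 < n) :
    (if (0:Int) < (n:Int) then (((n:Int) - 0 + (wn:Int) - 1) / (wn:Int)).toNat else 0)
    = (if (0:Int) < ((n - wn : Nat):Int) then ((((n - wn : Nat):Int) - 0 + (wn:Int) - 1) / (wn:Int)).toNat else 0) + 1 := by
  have hwZ : (0:Int) < (wn:Int) := by exact_mod_cast hw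
  rw [if_pos (by exact_mod_cast hn)]
  by_cases h : n ≤ wn
  · rw [if_neg (by omega)]
    have : ((n:Int) - 0 + (wn:Int) - 1) / (wn:Int) = 1 := by
      rw [← PySem.Int.floordiv_eq_ediv_of_pos hwZ,
          PySem.Int.floordiv_eq_iff_of_pos hwZ]
      constructor <;> [omega; omega]
    rw [this]; rfl
  · push_neg at h
    rw [if_pos (by omega)]
    have hcast : (((n - wn : Nat)):Int) = (n:Int) - (wn:Int) := by omega
    have : ((n:Int) - 0 + (wn:Int) - 1) / (wn:Int)
         = (((n - wn : Nat):Int) - 0 + (wn:Int) - 1) / (wn:Int) + 1 := by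
      rw [hcast]
      rw [show (n:Int) - 0 + (wn:Int) - 1 = ((n:Int) - (wn:Int) - 0 + (wn:Int) - 1) + 1 * (wn:Int) by ring]
      rw [Int.add_mul_ediv_right _ _ (by omega)]
    rw [this]
    have h1 : (0:Int) ≤ (((n - wn : Nat):Int) - 0 + (wn:Int) - 1) / (wn:Int) :=
      Int.ediv_nonneg (by omega) (by omega)
    omega

-- the indexed chunk map over range equals pvChunks
theorem range_chunks (wn : Nat) (hw : 0 < wn) :
    ∀ (N : Nat) (xs : List Int), xs.length ≤ N →
      (List.range (if (0:Int) < (xs.length:Int) then (((xs.length:Int) - 0 + (wn:Int) - 1) / (wn:Int)).toNat else 0)).map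
        (fun k => (xs.drop (wn * k)).take wn)
      = pvChunks (wn - 1) xs := by
  intro N
  induction N with
  | zero =>
      intro xs h
      have : xs = [] := List.length_eq_zero_iff.mp (Nat.le_zero.mp h)
      subst this; simp [pvChunks]
  | succ N ih =>
      intro xs h
      cases xs with
      | nil => simp [pvChunks]
      | cons x t =>
          have hn : 0 < (x :: t).length := by simp
          rw [count_split wn (x :: t).length hw hn]
          rw [List.range_succ_eq_map, List.map_cons, List.map_map]
          have hx : ((x :: t).drop (wn * 0)).take wn = (x :: t).take (wn - 1 + 1) := by
            simp [Nat.sub_add_cancel hw]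
          have hdroplen : ((x :: t).drop wn).length = (x :: t).length - wn := by simp
          have ihd := ih ((x :: t).drop wn) (by simp at h ⊢; omega)
          rw [hdroplen] at ihd
          have hrest : (List.range (if (0:Int) < (((x :: t).length - wn : Nat):Int) then (((((x :: t).length - wn : Nat):Int) - 0 + (wn:Int) - 1) / (wn:Int)).toNat else 0)).map
              ((fun k => ((x :: t).drop (wn * k)).take wn) ∘ Nat.succ)
              = pvChunks (wn - 1) ((x :: t).drop wn) := by
            rw [← ihd]
            apply List.map_congr_left
            intro k _
            simp only [Function.comp]
            rw [show wn * Nat.succ k = wn + wn * k by rw [Nat.mul_succ]; omega, ← List.drop_drop]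
          rw [pvChunks_cons]
          rw [Nat.sub_add_cancel hw] at *
          rw [hx, hrest]

-- the segments A slices out of order are exactly pvChunks
theorem segs_eq (wn : Nat) (hw : 0 < wn) (xs : List Int) :
    (PySem.List.pyRange 0 (xs.length : Int) (wn : Int)).map
      (fun s => PySem.List.slice xs (some s) (some (s + (wn : Int))))
    = pvChunks (wn - 1) xs := by
  have hwZ : (0:Int) < (wn:Int) := by exact_mod_cast hw
  rw [PySem.List.pyRange_of_pos _ _ hwZ, List.map_map]
  rw [← range_chunks wn hw xs.length xs le_rfl]
  apply List.map_congr_left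
  intro k _
  simp only [Function.comp]
  rw [show (0:Int) + (wn:Int) * (k:Int) = ((wn * k : Nat) : Int) by push_cast; ring]
  rw [show ((wn * k : Nat) : Int) + (wn : Int) = ((wn * k : Nat) : Int) + ((wn : Nat) : Int) from rfl]
  exact PySem.List.slice_natCast_add xs (wn * k) wn

-- B's streaming step, abstracted over the three token functions
def pvStep (P C M : Int → String) (w : Int)
    (st : List String × List String × List String × List String) (col : Int) :
    List String × List String × List String × List String :=
  let lines := st.1
  let p := st.2.1 ++ [P col]
  let c := st.2.2.1 ++ [C col]
  let m := st.2.2.2 ++ [M col]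
  if (p.length : Int) = w then
    ((if lines = [] then lines else lines ++ [""]) ++
      [PySem.Str.join "" p, PySem.Str.join "" c, PySem.Str.join "" m], [], [], [])
  else (lines, p, c, m)

-- processing fewer than w further columns never flushes
theorem noflush (P C M : Int → String) (wn : Nat) :
    ∀ (ys : List Int) (lines p c m : List String), p.length + ys.length < wn →
      ys.foldl (pvStep P C M (wn : Int)) (lines, p, c, m)
      = (lines, p ++ ys.map P, c ++ ys.map C, m ++ ys.map M) := by
  intro ys
  induction ys with
  | nil => intro lines p c m _; simp
  | cons y ys ih =>
      intro lines p c m h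
      simp only [List.foldl_cons]
      rw [show pvStep P C M (wn : Int) (lines, p, c, m) y
            = (lines, p ++ [P y], c ++ [C y], m ++ [M y]) by
          simp only [pvStep]
          rw [if_neg (by simp at h ⊢; omega)]]
      rw [ih lines (p ++ [P y]) (c ++ [C y]) (m ++ [M y]) (by simp at h ⊢; omega)]
      simp

-- the streaming fold plus final flush computes the separator-before chunk fold
theorem stream_eq (P C M : Int → String) (wn : Nat) (hw : 0 < wn) :
    ∀ (N : Nat) (xs : List Int), xs.length ≤ N → ∀ (lines : List String),
      (let st := xs.foldl (pvStep P C M (wn : Int)) (lines, [], [], []);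
       if st.2.1 ≠ [] then
         (if st.1 = [] then st.1 else st.1 ++ [""]) ++
           [PySem.Str.join "" st.2.1, PySem.Str.join "" st.2.2.1, PySem.Str.join "" st.2.2.2]
       else st.1)
      = pvChunkFold P C M lines (pvChunks (wn - 1) xs) := by
  intro N
  induction N with
  | zero =>
      intro xs h lines
      have : xs = [] := List.length_eq_zero_iff.mp (Nat.le_zero.mp h)
      subst this; simp [pvChunks, pvChunkFold]
  | succ N ih =>
      intro xs h lines
      cases xs with
      | nil => simp [pvChunks, pvChunkFold]
      | cons x t =>
      by_cases hlen : (x :: t).length < wn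
      · -- one final partial block, no flush during the pass
        rw [noflush P C M wn (x :: t) lines [] [] [] (by simpa using hlen)]
        have hch : pvChunks (wn - 1) (x :: t) = [x :: t] := by
          rw [pvChunks_cons, Nat.sub_add_cancel hw]
          rw [List.take_of_length_le (by omega), List.drop_of_length_le (by omega)]
          simp [pvChunks]
        rw [hch]
        simp [pvChunkFold, pvSep, pvBlock]
      · -- a full chunk flushes, then recurse on the rest
        push_neg at hlen
        have hsplit : x :: t = (x :: t).take wn ++ (x :: t).drop wn := (List.take_append_drop wn (x :: t)).symm
        rw [show (x :: t).foldl (pvStep P C M (wn : Int)) (lines, [], [], [])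
              = ((x :: t).drop wn).foldl (pvStep P C M (wn : Int))
                  (((x :: t).take wn).foldl (pvStep P C M (wn : Int)) (lines, [], [], [])) by
            conv_lhs => rw [hsplit]
            rw [List.foldl_append]]
        have htk : (x :: t).take wn = (x :: t).take (wn - 1) ++ ((x :: t)[wn - 1]?).toList := by
          conv_lhs => rw [show wn = (wn - 1) + 1 by omega]
          rw [List.take_add_one]
        have hget : ((x :: t)[wn - 1]?) = some ((x :: t)[wn - 1]'(by omega)) := List.getElem?_eq_getElem (by omega)
        have hfirst : ((x :: t).take wn).foldl (pvStep P C M (wn : Int)) (lines, [], [], [])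
            = ((if lines = [] then lines else lines ++ [""]) ++ pvBlock P C M ((x :: t).take wn), [], [], []) := by
          rw [htk, hget]
          simp only [Option.toList_some, List.foldl_append]
          rw [noflush P C M wn ((x :: t).take (wn - 1)) lines [] [] []
                (by
                  have h1 := List.length_take_le (wn - 1) (x :: t)
                  simp only [List.length_nil, List.length_take] at *
                  omega)]
          simp only [List.foldl_cons, List.foldl_nil, pvStep, List.nil_append]
          rw [if_pos (by
            have hmin : (List.take (wn - 1) (x :: t)).length = wn - 1 := by
              rw [List.length_take]; omega
            simp only [List.length_append, List.length_map, hmin, List.length_cons, List.length_nil]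
            omega)]
          simp only [pvBlock, List.map_append, List.map_cons, List.map_nil]
        rw [hfirst]
        have hdlen : ((x :: t).drop wn).length ≤ N := by simp at h ⊢; omega
        rw [ih ((x :: t).drop wn) hdlen _]
        rw [pvChunks_cons, Nat.sub_add_cancel hw]
        simp [pvChunkFold, pvSep]

-- the pyRange is empty for a negative step over a nonnegative stop
theorem pyRange_neg_empty (n s : Int) (hn : 0 ≤ n) (hs : s < 0) :
    PySem.List.pyRange 0 n s = [] := by
  simp only [PySem.List.pyRange]
  rw [if_neg (by omega), if_neg (by omega), if_neg (by omega)]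
  simp

-- ===== VERDICT =====
theorem render_alignment_py_spec : Claim_equal_render_alignment_py := by
  intro order parent_map child_map highlight_cols line_width _ hpre
  unfold Spec_render_alignment_py
  set P := fun col => PySem.Dict.getD (⟨parent_map⟩ : PySem.Dict Int String) col "-" with hP
  set C := fun col => PySem.Dict.getD (⟨child_map⟩ : PySem.Dict Int String) col "-" with hC
  set M := fun col => if PySem.Set.contains highlight_cols col then "^" else " " with hM
  by_cases hneg : line_width < 0
  · -- A's range is empty, B's guard fires: both return []
    unfold render_alignment_py render_alignment_py_alt
    rw [pyRange_neg_empty _ _ (by positivity) hneg]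
    simp [show line_width ≤ 0 by omega]
  · have hpos : 0 < line_width := by
      rcases lt_trichotomy line_width 0 with h | h | h
      · exact absurd h hneg
      · exact absurd h hpre
      · exact h
    set wn := line_width.toNat with hwn
    have hw : 0 < wn := by omega
    have hcast : line_width = (wn : Int) := by omega
    -- A = separator-before fold over the sliced segments = pvChunkFold over pvChunks
    have hA : render_alignment_py order parent_map child_map highlight_cols line_width
        = pvChunkFold P C M [] (pvChunks (wn - 1) order) := by
      unfold render_alignment_py
      rw [main_shape (fun s => PySem.Str.join "" ((PySem.List.slice order (some s) (some (s + line_width))).map P))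
                     (fun s => PySem.Str.join "" ((PySem.List.slice order (some s) (some (s + line_width))).map C))
                     (fun s => PySem.Str.join "" ((PySem.List.slice order (some s) (some (s + line_width))).map M))]
      rw [hcast, ← segs_eq wn hw order]
      simp [pvChunkFold, pvBlock, List.foldl_map]
    -- B = the streaming fold = the same pvChunkFold
    have hB : render_alignment_py_alt order parent_map child_map highlight_cols line_width
        = pvChunkFold P C M [] (pvChunks (wn - 1) order) := by
      unfold render_alignment_py_alt
      rw [if_neg (by omega)]
      rw [← stream_eq P C M wn hw order.length order le_rfl []]
      rw [hcast]
      rfl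
    rw [hA, hB]
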